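-- pv_equiv track=rewrite | github.com/SwetaKumariii/PALB-2CSE24-2410031530 | Assignment 9   /Problem-54.py | min_people
-- ===== SOURCE A (Python) =====
-- def min_people(arr):
--     n = len(arr)
--     intervals = []
--
--     for i in range(n):
--         if arr[i] != -1:
--             left = max(0, i - arr[i])
--             right = min(n - 1, i + arr[i])
--             intervals.append((left, right))
--
--     intervals.sort()
--
--     count = 0
--     i = 0
--     current_end = 0
--     farthest = 0
--
--     while current_end < n:
--         while i < len(intervals) and intervals[i][0] <= current_end:
--             farthest = max(farthest, intervals[i][1])
--             i += 1
--
--         if farthest == current_end: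
--             return -1
--
--         count += 1
--         current_end = farthest + 1
--
--     return count
-- ===== SOURCE B (Python) =====
-- def min_people(arr):
--     n = len(arr)
--     reach = [-1] * n
--     for i, a in enumerate(arr):
--         if a != -1:
--             left = max(0, i - a)
--             if left < n:
--                 r = min(n - 1, i + a)
--                 if r > reach[left]:
--                     reach[left] = r
--     best = []
--     far = 0
--     for v in reach:
--         if v > far:
--             far = v
--         best.append(far)
--     count = 0
--     current_end = 0
--     while current_end < n:
--         farthest = best[current_end]
--         if farthest == current_end:
--             return -1
--         count += 1
--         current_end = farthest + 1
--     return count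
-- ===== Notes on version B (the rewrite author's own statement) =====
-- stated objective: faster
-- what changed: B replaces A's sort of the interval list and its pointer-based merge sweep by an O(n) bucket array reach[left]=best right endpoint plus a prefix-maximum table best, so the jump loop just reads best[current_end]; no sorting and no interval pointer remain.
import Mathlib
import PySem

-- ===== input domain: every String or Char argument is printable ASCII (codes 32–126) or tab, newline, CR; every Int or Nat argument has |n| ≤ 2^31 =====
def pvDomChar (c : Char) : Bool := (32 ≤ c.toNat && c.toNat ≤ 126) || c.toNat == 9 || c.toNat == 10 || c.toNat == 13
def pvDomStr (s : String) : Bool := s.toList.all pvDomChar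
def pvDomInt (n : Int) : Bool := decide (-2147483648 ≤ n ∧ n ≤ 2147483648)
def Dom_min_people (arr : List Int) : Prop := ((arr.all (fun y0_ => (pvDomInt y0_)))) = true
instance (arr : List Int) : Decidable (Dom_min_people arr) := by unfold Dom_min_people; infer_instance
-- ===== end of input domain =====

-- B replaces A's sort-and-merge sweep by an O(n) bucket array of reach maxima plus a
-- prefix-maximum table, so the jump loop reads best[current_end] directly (objective: faster).

-- ===== PORT A =====
-- inner 'while i < len(intervals) and intervals[i][0] <= current_end' loop of A,
-- with the not-yet-consumed suffix of the sorted interval list as explicit state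
def consumeA : List (Int × Int) → Int → Int → Int × List (Int × Int)
  | [], far, _ => (far, [])
  | q :: rest, far, c => if q.1 ≤ c then consumeA rest (max far q.2) c else (far, q :: rest)

-- outer 'while current_end < n' loop of A; the fuel only makes the recursion total:
-- whenever the Python loop terminates it runs at most n+1 iterations, so the fuel
-- branch is reached exactly on the inputs where the Python loop never returns
-- (farthest stuck at current_end - 1); B's loop stalls there identically
def loopA : Nat → List (Int × Int) → Int → Int → Int → Int → Int
  | 0, _, _, _, _, _ => -2
  | fuel+1, ivs, n, count, c, far =>
    if c < n then
      let s := consumeA ivs far c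
      if s.1 = c then -1
      else loopA fuel s.2 n (count + 1) (s.1 + 1) s.1
    else count

def min_people (arr : List Int) : Int :=
  let n : Int := (arr.length : Int)
  let intervals := (PySem.List.enumerate arr).foldl
    (fun acc p => if p.2 ≠ -1 then acc ++ [(max 0 (p.1 - p.2), min (n - 1) (p.1 + p.2))] else acc) []
  loopA (arr.length + 1) (PySem.List.sorted2 intervals (fun q => q.1) (fun q => q.2)) n 0 0 0

-- ===== PORT B =====
-- reach[p] = best right endpoint of an interval starting at p (-1 if none);
-- reach[left] read/write is exact: the guard gives 0 ≤ left < n = reach.length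
def buildReach (arr : List Int) : List Int :=
  (PySem.List.enumerate arr).foldl
    (fun reach p =>
      if p.2 ≠ -1 then
        let left := max 0 (p.1 - p.2)
        if left < (arr.length : Int) then
          let r := min ((arr.length : Int) - 1) (p.1 + p.2)
          if reach.getD left.toNat 0 < r then reach.set left.toNat r else reach
        else reach
      else reach)
    (List.replicate arr.length (-1))

-- best[c] = running maximum of 0 and reach[0..c]
def buildBest (reach : List Int) : List Int :=
  (reach.foldl (fun s v =>
      let f := if s.1 < v then v else s.1
      (f, s.2 ++ [f]))
    ((0 : Int), ([] : List Int))).2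

-- B's 'while current_end < n' loop; best[current_end] is in range (0 ≤ c < n), so pyGetD is exact
def loopB : Nat → List Int → Int → Int → Int → Int
  | 0, _, _, _, _ => -2
  | fuel+1, best, n, count, c =>
    if c < n then
      let far := PySem.List.pyGetD best c 0
      if far = c then -1 else loopB fuel best n (count + 1) (far + 1)
    else count

def min_people_alt (arr : List Int) : Int :=
  loopB (arr.length + 1) (buildBest (buildReach arr)) (arr.length : Int) 0 0

-- ===== PRECONDITION & SPEC =====
def Spec_min_people (arr : List Int) (out : Int) : Prop := out = min_people_alt arr
instance (arr : List Int) (out : Int) : Decidable (Spec_min_people arr out) := by unfold Spec_min_people; infer_instance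

-- ===== CLAIM (what is proved, stated in full; the proofs are below) =====
def Claim_equal_min_people : Prop := ∀ (arr : List Int), Dom_min_people arr → Spec_min_people arr (min_people arr)

-- ===== LEMMAS AND PROOFS =====

-- the interval list both programs describe: (left, right) per position with arr[i] ≠ -1
def pvIvs (arr : List Int) : List (Int × Int) :=
  ((PySem.List.enumerate arr).filter (fun p => decide (p.2 ≠ -1))).map
    (fun p => (max 0 (p.1 - p.2), min ((arr.length : Int) - 1) (p.1 + p.2)))

-- max of f and all right endpoints of L
def pvMax (f : Int) (L : List (Int × Int)) : Int := L.foldl (fun f p => max f p.2) f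

-- furthest coverage reachable from positions ≤ c (0 if none)
def pvMv (arr : List Int) (c : Int) : Int :=
  pvMax 0 ((pvIvs arr).filter (fun p => decide (p.1 ≤ c)))


-- plain running max over an Int list
def maxL (a : Int) (l : List Int) : Int := l.foldl max a

theorem maxL_append (a : Int) (l1 l2 : List Int) : maxL a (l1 ++ l2) = maxL (maxL a l1) l2 := by
  simp [maxL, List.foldl_append]

theorem le_maxL (a : Int) (l : List Int) : a ≤ maxL a l := by
  simpa [maxL] using (PySem.List.le_foldl_max_int l (fun x => x) a).1

theorem maxL_init {a b : Int} (l : List Int) (h : b ≤ a) : maxL a l = max a (maxL b l) := by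
  induction l generalizing a b with
  | nil => simp [maxL]; omega
  | cons x t ih =>
    have h2 : max b x ≤ max a x := by omega
    have hx : x ≤ maxL (max b x) t := le_trans (le_max_right b x) (le_maxL _ t)
    calc maxL a (x :: t) = maxL (max a x) t := rfl
      _ = max (max a x) (maxL (max b x) t) := ih h2
      _ = max a (maxL (max b x) t) := by omega
      _ = max a (maxL b (x :: t)) := rfl

theorem maxL_perm (a : Int) {l1 l2 : List Int} (h : l1.Perm l2) : maxL a l1 = maxL a l2 := by
  unfold maxL
  haveI : RightCommutative (fun (a b : Int) => max a b) := ⟨fun a b c => max_right_comm a b c⟩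
  exact h.foldl_eq a

theorem pvMax_eq_maxL (f : Int) (L : List (Int × Int)) : pvMax f L = maxL f (L.map (·.2)) := by
  simp [pvMax, maxL, List.foldl_map]

theorem pvMax_perm (f : Int) {L1 L2 : List (Int × Int)} (h : L1.Perm L2) : pvMax f L1 = pvMax f L2 := by
  rw [pvMax_eq_maxL, pvMax_eq_maxL]
  exact maxL_perm f (h.map _)

-- A's interval-building loop produces pvIvs
theorem build_eq (arr : List Int) :
    (PySem.List.enumerate arr).foldl
      (fun acc p => if p.2 ≠ -1 then
        acc ++ [(max 0 (p.1 - p.2), min ((arr.length : Int) - 1) (p.1 + p.2))] else acc) []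
    = pvIvs arr := by
  simpa [pvIvs] using PySem.List.foldl_append_ite (fun p : Int × Int => p.2 ≠ -1)
    (fun p => (max 0 (p.1 - p.2), min ((arr.length : Int) - 1) (p.1 + p.2)))
    (PySem.List.enumerate arr) []

theorem mem_pvIvs_fst_nonneg (arr : List Int) {q : Int × Int} (h : q ∈ pvIvs arr) : 0 ≤ q.1 := by
  simp only [pvIvs, List.mem_map] at h
  obtain ⟨p, -, rfl⟩ := h
  exact le_max_left 0 _

-- A's inner while loop on an fst-sorted list: consumes exactly the intervals with fst ≤ c
theorem consumeA_sorted {L : List (Int × Int)} (far c : Int)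
    (h : L.Pairwise (fun a b => a.1 ≤ b.1)) :
    consumeA L far c =
      (pvMax far (L.filter (fun p => decide (p.1 ≤ c))), L.filter (fun p => !decide (p.1 ≤ c))) := by
  induction L generalizing far with
  | nil => simp [consumeA, pvMax]
  | cons q rest ih =>
    rcases List.pairwise_cons.mp h with ⟨hq, hrest⟩
    by_cases hc : q.1 ≤ c
    · simp only [consumeA, List.filter_cons, hc, decide_true, Bool.not_true, if_true,
        ih (max far q.2) hrest]
      simp [pvMax]
    · have hall : ∀ p ∈ rest, ¬ (p.1 ≤ c) := fun p hp => fun hle => hc (le_trans (hq p hp) hle)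
      have h1 : (q :: rest).filter (fun p => decide (p.1 ≤ c)) = [] := by
        rw [List.filter_eq_nil_iff]
        intro p hp
        rcases List.mem_cons.mp hp with rfl | hp'
        · simpa using hc
        · simpa using hall p hp'
      have h2 : (q :: rest).filter (fun p => !decide (p.1 ≤ c)) = q :: rest := by
        rw [List.filter_eq_self]
        intro p hp
        rcases List.mem_cons.mp hp with rfl | hp'
        · simpa using hc
        · simpa using hall p hp'
      simp [consumeA, if_neg hc, h1, h2, pvMax]

-- Python's tuple sort keeps first components nondecreasing
theorem insertBy_pairwise_fst (x : Int × Int) (ys : List (Int × Int))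
    (h : ys.Pairwise (fun a b => a.1 ≤ b.1)) :
    (PySem.List.insertBy
      (fun a b => decide (a.1 < b.1) || (!decide (b.1 < a.1) && decide (a.2 < b.2))) x ys).Pairwise
      (fun a b => a.1 ≤ b.1) := by
  induction ys with
  | nil => simp [PySem.List.insertBy]
  | cons y ys ih =>
    rcases List.pairwise_cons.mp h with ⟨hy, hys⟩
    by_cases hb : (decide (x.1 < y.1) || (!decide (y.1 < x.1) && decide (x.2 < y.2))) = true
    · rw [PySem.List.insertBy, if_pos hb]
      have hxy : x.1 ≤ y.1 := by
        rcases Bool.or_eq_true_iff.mp hb with h1 | h2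
        · exact le_of_lt (of_decide_eq_true h1)
        · have := Bool.and_eq_true_iff.mp h2
          have h3 : ¬ (y.1 < x.1) := by simpa using this.1
          omega
      refine List.pairwise_cons.mpr ⟨?_, h⟩
      intro z hz
      rcases List.mem_cons.mp hz with rfl | hz'
      · exact hxy
      · exact le_trans hxy (hy z hz')
    · rw [PySem.List.insertBy, if_neg hb]
      have hyx : y.1 ≤ x.1 := by
        have := (by simpa using hb : y.1 ≤ x.1 ∧ (x.1 ≤ y.1 → y.2 ≤ x.2))
        exact this.1
      refine List.pairwise_cons.mpr ⟨?_, ih hys⟩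
      intro z hz
      rcases (PySem.List.insertBy_mem_iff _ x z ys).mp hz with rfl | hz'
      · exact hyx
      · exact hy z hz'

theorem sorted2_pairwise_fst (I : List (Int × Int)) :
    (PySem.List.sorted2 I (fun q => q.1) (fun q => q.2)).Pairwise (fun a b => a.1 ≤ b.1) := by
  have aux : ∀ (L : List (Int × Int)) (acc : List (Int × Int)),
      acc.Pairwise (fun a b => a.1 ≤ b.1) →
      (L.foldl (fun acc x => PySem.List.insertBy
        (fun a b => decide (a.1 < b.1) || (!decide (b.1 < a.1) && decide (a.2 < b.2))) x acc) acc).Pairwise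
        (fun a b => a.1 ≤ b.1) := by
    intro L
    induction L with
    | nil => intro acc h; exact h
    | cons x L ih =>
      intro acc h
      exact ih _ (insertBy_pairwise_fst x acc h)
  simpa [PySem.List.sorted2] using aux I [] (by simp)

theorem le_pvMax (f : Int) (L : List (Int × Int)) : f ≤ pvMax f L := by
  rw [pvMax_eq_maxL]; exact le_maxL f _

theorem rem_step (S : List (Int × Int)) {cp c : Int} (h : cp ≤ c) :
    (S.filter (fun p => !decide (p.1 ≤ cp))).filter (fun p => !decide (p.1 ≤ c))
    = S.filter (fun p => !decide (p.1 ≤ c)) := by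
  rw [List.filter_filter]
  apply List.filter_congr
  intro x _
  by_cases h1 : x.1 ≤ cp <;> by_cases h2 : x.1 ≤ c <;> simp [h1, h2] <;> omega

theorem far_step (S : List (Int × Int)) {cp c : Int} (h : cp ≤ c) :
    pvMax (pvMax 0 (S.filter (fun p => decide (p.1 ≤ cp))))
      ((S.filter (fun p => !decide (p.1 ≤ cp))).filter (fun p => decide (p.1 ≤ c)))
    = pvMax 0 (S.filter (fun p => decide (p.1 ≤ c))) := by
  have hsplit := List.filter_append_perm (fun p : Int × Int => decide (p.1 ≤ cp))
    (S.filter (fun p => decide (p.1 ≤ c)))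
  have h1 : (S.filter (fun p => decide (p.1 ≤ c))).filter (fun p => decide (p.1 ≤ cp))
      = S.filter (fun p => decide (p.1 ≤ cp)) := by
    rw [List.filter_filter]
    apply List.filter_congr
    intro x _
    by_cases h1 : x.1 ≤ cp <;> by_cases h2 : x.1 ≤ c <;> simp [h1, h2] <;> omega
  have h2 : (S.filter (fun p => decide (p.1 ≤ c))).filter (fun p => !decide (p.1 ≤ cp))
      = (S.filter (fun p => !decide (p.1 ≤ cp))).filter (fun p => decide (p.1 ≤ c)) := by
    rw [List.filter_filter, List.filter_filter]
    apply List.filter_congr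
    intro x _
    by_cases h1 : x.1 ≤ cp <;> by_cases h2 : x.1 ≤ c <;> simp [h1, h2]
  rw [h1, h2] at hsplit
  calc pvMax (pvMax 0 (S.filter (fun p => decide (p.1 ≤ cp))))
        ((S.filter (fun p => !decide (p.1 ≤ cp))).filter (fun p => decide (p.1 ≤ c)))
      = pvMax 0 (S.filter (fun p => decide (p.1 ≤ cp)) ++
          (S.filter (fun p => !decide (p.1 ≤ cp))).filter (fun p => decide (p.1 ≤ c))) := by
        rw [pvMax_eq_maxL, pvMax_eq_maxL, pvMax_eq_maxL, List.map_append, maxL_append]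
    _ = pvMax 0 (S.filter (fun p => decide (p.1 ≤ c))) := pvMax_perm 0 hsplit

theorem pvMv_nonneg (arr : List Int) (c : Int) : 0 ≤ pvMv arr c := le_pvMax _ _

theorem pvMv_mono (arr : List Int) {cp c : Int} (h : cp ≤ c) : pvMv arr cp ≤ pvMv arr c := by
  unfold pvMv
  rw [← far_step (pvIvs arr) h]
  exact le_pvMax _ _

-- rights of the intervals generated at exactly position k
def pvRightsAt (arr : List Int) (k : Int) : List Int :=
  ((pvIvs arr).filter (fun q => decide (q.1 = k))).map (·.2)

theorem buildReach_step_length (arr : List Int) (reach : List Int) (p : Int × Int) :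
    (if p.2 ≠ -1 then
        if max 0 (p.1 - p.2) < (arr.length : Int) then
          if reach.getD (max 0 (p.1 - p.2)).toNat 0 < min ((arr.length : Int) - 1) (p.1 + p.2)
          then reach.set (max 0 (p.1 - p.2)).toNat (min ((arr.length : Int) - 1) (p.1 + p.2))
          else reach
        else reach
      else reach).length = reach.length := by
  split_ifs <;> simp

theorem buildReach_aux (arr : List Int) :
    ∀ (E : List (Int × Int)) (reach0 : List Int), reach0.length = arr.length →
    ∀ (k : Nat), k < arr.length →
    (E.foldl (fun reach p =>
      if p.2 ≠ -1 then
        if max 0 (p.1 - p.2) < (arr.length : Int) then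
          if reach.getD (max 0 (p.1 - p.2)).toNat 0 < min ((arr.length : Int) - 1) (p.1 + p.2)
          then reach.set (max 0 (p.1 - p.2)).toNat (min ((arr.length : Int) - 1) (p.1 + p.2))
          else reach
        else reach
      else reach) reach0).getD k 0
    = maxL (reach0.getD k 0)
        ((E.filter (fun p => decide (p.2 ≠ -1 ∧ max 0 (p.1 - p.2) = (k : Int)))).map
          (fun p => min ((arr.length : Int) - 1) (p.1 + p.2))) := by
  intro E
  induction E with
  | nil => intro reach0 _ k _; simp [maxL]
  | cons p E ih =>
    intro reach0 hlen k hk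
    set left : Int := max 0 (p.1 - p.2) with hleft
    set r : Int := min ((arr.length : Int) - 1) (p.1 + p.2) with hr
    have hleft0 : 0 ≤ left := le_max_left _ _
    have hcast : (left.toNat : Int) = left := Int.toNat_of_nonneg hleft0
    by_cases hp : p.2 ≠ -1
    · by_cases hlt : left < (arr.length : Int)
      · have hltn : left.toNat < arr.length := by omega
        have hbody : ∀ reach1 : List Int, reach1 =
            (if reach0.getD left.toNat 0 < r then reach0.set left.toNat r else reach0) →
            reach1.length = arr.length ∧
            reach1.getD k 0 = (if left = (k : Int) then max (reach0.getD k 0) r else reach0.getD k 0) := by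
          intro reach1 hdef
          constructor
          · rw [hdef]; split_ifs <;> simp [hlen]
          · rw [hdef]
            by_cases hlk : left = (k : Int)
            · have hkeq : left.toNat = k := by omega
              rw [if_pos hlk, hkeq]
              have hklen : k < reach0.length := by omega
              split_ifs with hcmp
              · rw [List.getD_eq_getElem _ _ (by simp; omega), List.getElem_set_self]
                rw [List.getD_eq_getElem _ _ hklen] at hcmp ⊢
                omega
              · rw [List.getD_eq_getElem _ _ hklen] at hcmp ⊢
                omega
            · have hkne : left.toNat ≠ k := by omega
              rw [if_neg hlk]
              split_ifs with hcmp
              · have hklen : k < reach0.length := by omega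
                rw [List.getD_eq_getElem _ _ (by simp; omega),
                  List.getD_eq_getElem _ _ hklen, List.getElem_set_ne hkne]
              · rfl
        obtain ⟨hlen1, hval1⟩ := hbody _ rfl
        simp only [List.foldl_cons, if_pos hp, ← hleft, ← hr, if_pos hlt]
        rw [ih _ hlen1 k hk, hval1]
        by_cases hlk : left = (k : Int)
        · rw [if_pos hlk]
          rw [List.filter_cons, show (decide (p.2 ≠ -1 ∧ max 0 (p.1 - p.2) = (k:Int))) = true from
            (by simp [hlk, hp] : (decide (p.2 ≠ -1 ∧ left = (k:Int))) = true)]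
          simp only [if_true, List.map_cons]
          rfl
        · rw [if_neg hlk]
          rw [List.filter_cons, show (decide (p.2 ≠ -1 ∧ max 0 (p.1 - p.2) = (k:Int))) = false from
            (by simp [hlk] : (decide (p.2 ≠ -1 ∧ left = (k:Int))) = false)]
          simp only [Bool.false_eq_true, if_false]
      · have : (decide (p.2 ≠ -1 ∧ left = (k:Int))) = false := by
          simp only [decide_eq_false_iff_not]
          rintro ⟨-, h2⟩
          omega
        simp only [List.foldl_cons, if_pos hp, ← hleft, ← hr, if_neg hlt,
          List.filter_cons, this, Bool.false_eq_true, if_false]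
        exact ih _ hlen k hk
    · have : (decide (p.2 ≠ -1 ∧ left = (k:Int))) = false := by
        simp only [decide_eq_false_iff_not]
        rintro ⟨h1, -⟩
        exact h1 (by simpa using hp)
      simp only [List.foldl_cons, if_pos hp, if_neg hp, ← hleft, ← hr,
        List.filter_cons, this, Bool.false_eq_true, if_false]
      exact ih _ hlen k hk

theorem length_buildReach (arr : List Int) : (buildReach arr).length = arr.length := by
  have aux : ∀ (E : List (Int × Int)) (acc : List Int),
      (E.foldl (fun reach p =>
        if p.2 ≠ -1 then
          if max 0 (p.1 - p.2) < (arr.length : Int) then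
            if reach.getD (max 0 (p.1 - p.2)).toNat 0 < min ((arr.length : Int) - 1) (p.1 + p.2)
            then reach.set (max 0 (p.1 - p.2)).toNat (min ((arr.length : Int) - 1) (p.1 + p.2))
            else reach
          else reach
        else reach) acc).length = acc.length := by
    intro E
    induction E with
    | nil => intro acc; rfl
    | cons p E ih =>
      intro acc
      rw [List.foldl_cons, ih _, buildReach_step_length]
  unfold buildReach
  rw [aux, List.length_replicate]

-- reach[k] is the best right endpoint among intervals starting exactly at k
theorem reach_at (arr : List Int) (k : Nat) (hk : k < arr.length) :
    (buildReach arr).getD k 0 = maxL (-1) (pvRightsAt arr (k : Int)) := by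
  have h0 : (List.replicate arr.length (-1 : Int)).getD k 0 = -1 := by
    rw [List.getD_eq_getElem _ _ (by simpa using hk), List.getElem_replicate]
  have hrights : pvRightsAt arr (k : Int) =
      ((PySem.List.enumerate arr).filter
        (fun p => decide (p.2 ≠ -1 ∧ max 0 (p.1 - p.2) = (k : Int)))).map
        (fun p => min ((arr.length : Int) - 1) (p.1 + p.2)) := by
    unfold pvRightsAt pvIvs
    rw [List.filter_map, List.map_map, List.filter_filter]
    congr 1
    apply List.filter_congr
    intro x _
    by_cases h1 : x.2 ≠ -1 <;> by_cases h2 : max 0 (x.1 - x.2) = (k : Int) <;>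
      simp [h1, h2, Function.comp]
  rw [hrights]
  unfold buildReach
  rw [buildReach_aux arr _ _ (by simp) k hk, h0]

-- functional form of B's prefix-maximum pass
def pmAux : Int → List Int → List Int
  | _, [] => []
  | f, v :: t => (max f v) :: pmAux (max f v) t

theorem buildBest_aux : ∀ (l : List Int) (f : Int) (acc : List Int),
    (l.foldl (fun s v => let f := if s.1 < v then v else s.1; (f, s.2 ++ [f])) (f, acc)).2
    = acc ++ pmAux f l := by
  intro l
  induction l with
  | nil => intro f acc; simp [pmAux]
  | cons v t ih =>
    intro f acc
    have hmax : (if f < v then v else f) = max f v := by omega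
    simp only [List.foldl_cons, hmax, ih, pmAux]
    simp

theorem buildBest_eq (reach : List Int) : buildBest reach = pmAux 0 reach := by
  unfold buildBest
  rw [buildBest_aux]
  simp

theorem length_pmAux : ∀ (l : List Int) (f : Int), (pmAux f l).length = l.length := by
  intro l
  induction l with
  | nil => intro f; rfl
  | cons v t ih => intro f; simp [pmAux, ih]

theorem pmAux_getD : ∀ (l : List Int) (f : Int) (k : Nat), k < l.length →
    (pmAux f l).getD k 0 = maxL f (l.take (k + 1)) := by
  intro l
  induction l with
  | nil => intro f k hk; simp at hk
  | cons v t ih =>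
    intro f k hk
    match k with
    | 0 => simp [pmAux, maxL]
    | k + 1 =>
      have hk' : k < t.length := by simpa using hk
      show (pmAux (max f v) t).getD k 0 = maxL f (v :: t.take (k + 1))
      rw [ih (max f v) k hk']
      rfl

theorem pvMv_zero (arr : List Int) : pvMv arr 0 = max 0 (maxL (-1) (pvRightsAt arr 0)) := by
  unfold pvMv
  have h1 : (pvIvs arr).filter (fun p => decide (p.1 ≤ (0:Int)))
      = (pvIvs arr).filter (fun q => decide (q.1 = (0:Int))) := by
    apply List.filter_congr
    intro x hx
    have := mem_pvIvs_fst_nonneg arr hx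
    by_cases h : x.1 = (0:Int) <;> simp [h] <;> omega
  rw [h1, pvMax_eq_maxL, maxL_init _ (by omega : (-1:Int) ≤ 0)]
  rfl

theorem pvMv_succ (arr : List Int) (c : Int) :
    pvMv arr (c + 1) = max (pvMv arr c) (maxL (-1) (pvRightsAt arr (c + 1))) := by
  have hstep := far_step (pvIvs arr) (by omega : c ≤ c + 1)
  have h1 : ((pvIvs arr).filter (fun p => !decide (p.1 ≤ c))).filter
      (fun p => decide (p.1 ≤ c + 1)) = (pvIvs arr).filter (fun q => decide (q.1 = c + 1)) := by
    rw [List.filter_filter]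
    apply List.filter_congr
    intro x _
    by_cases h : x.1 = c + 1 <;> by_cases h2 : x.1 ≤ c <;> simp [h, h2] <;> omega
  rw [h1] at hstep
  have h2 : pvMax (pvMv arr c) ((pvIvs arr).filter (fun q => decide (q.1 = c + 1)))
      = max (pvMv arr c) (maxL (-1) (pvRightsAt arr (c + 1))) := by
    rw [pvMax_eq_maxL, maxL_init _ (by have := pvMv_nonneg arr c; omega : (-1:Int) ≤ pvMv arr c)]
    rfl
  rw [← h2]
  unfold pvMv
  rw [← hstep]

theorem group (arr : List Int) : ∀ (c : Nat), c < arr.length →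
    maxL 0 ((buildReach arr).take (c + 1)) = pvMv arr (c : Int) := by
  intro c
  induction c with
  | zero =>
    intro hc
    have hlen : 0 < (buildReach arr).length := by rw [length_buildReach]; omega
    have htake : (buildReach arr).take 1 = [(buildReach arr)[0]] := by
      rw [List.take_add_one, List.getElem?_eq_getElem hlen]
      rfl
    rw [htake]
    have : (buildReach arr)[0] = (buildReach arr).getD 0 0 := (List.getD_eq_getElem _ _ hlen).symm
    rw [show maxL 0 [(buildReach arr)[0]] = max (0:Int) ((buildReach arr)[0]) from rfl, this,
      reach_at arr 0 hc]
    simp only [Nat.cast_zero]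
    rw [pvMv_zero]
  | succ c ih =>
    intro hc
    have hc' : c < arr.length := by omega
    have hlen : c + 1 < (buildReach arr).length := by rw [length_buildReach]; omega
    have htake : (buildReach arr).take (c + 2) =
        (buildReach arr).take (c + 1) ++ [(buildReach arr)[c + 1]] := by
      rw [List.take_add_one, List.getElem?_eq_getElem hlen]
      rfl
    have hgd : (buildReach arr)[c + 1] = (buildReach arr).getD (c + 1) 0 :=
      (List.getD_eq_getElem _ _ hlen).symm
    rw [htake, maxL_append, ih hc',
      show ∀ a x, maxL a [x] = max a x from fun a x => rfl, hgd,
      reach_at arr (c + 1) hc]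
    have hcast : ((c + 1 : Nat) : Int) = (c : Int) + 1 := by push_cast; ring
    rw [hcast, pvMv_succ]

theorem best_at (arr : List Int) (c : Int) (h0 : 0 ≤ c) (hc : c < (arr.length : Int)) :
    PySem.List.pyGetD (buildBest (buildReach arr)) c 0 = pvMv arr c := by
  have hlen : (buildBest (buildReach arr)).length = arr.length := by
    rw [buildBest_eq, length_pmAux, length_buildReach]
  rw [PySem.List.pyGetD_eq_getElem _ 0 h0 (by rw [hlen]; omega)]
  have hk : c.toNat < (buildReach arr).length := by rw [length_buildReach]; omega
  have : (buildBest (buildReach arr))[c.toNat] = (buildBest (buildReach arr)).getD c.toNat 0 := by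
    rw [List.getD_eq_getElem _ _ (by rw [hlen]; omega)]
  rw [this, buildBest_eq, pmAux_getD _ 0 c.toNat (by simpa using hk),
    group arr c.toNat (by omega), Int.toNat_of_nonneg h0]

-- the two while loops agree step for step: entering an iteration at current_end = c,
-- A's pending intervals are those with left > cp and its farthest is pvMv arr cp
theorem loop_eq (arr : List Int) :
    ∀ (fuel : Nat) (cp c count : Int), cp ≤ c → 0 ≤ c → c ≤ pvMv arr cp + 1 →
    loopA fuel ((PySem.List.sorted2 (pvIvs arr) (fun q => q.1) (fun q => q.2)).filter
        (fun p => !decide (p.1 ≤ cp))) (arr.length : Int) count c (pvMv arr cp)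
    = loopB fuel (buildBest (buildReach arr)) (arr.length : Int) count c := by
  have hperm : (PySem.List.sorted2 (pvIvs arr) (fun q => q.1) (fun q => q.2)).Perm (pvIvs arr) :=
    PySem.List.sorted2_perm _ _ _ _
  have hpair := sorted2_pairwise_fst (pvIvs arr)
  set S := PySem.List.sorted2 (pvIvs arr) (fun q => q.1) (fun q => q.2) with hS
  have hMv : ∀ x : Int, pvMax 0 (S.filter (fun p => decide (p.1 ≤ x))) = pvMv arr x := by
    intro x
    exact pvMax_perm 0 (hperm.filter _)
  intro fuel
  induction fuel with
  | zero => intro cp c count _ _ _; rfl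
  | succ fuel ih =>
    intro cp c count hcpc hc0 hinv
    by_cases hcn : c < (arr.length : Int)
    · have hcons := consumeA_sorted (L := S.filter (fun p => !decide (p.1 ≤ cp)))
        (pvMv arr cp) c (hpair.filter _)
      have hfar : pvMax (pvMv arr cp) ((S.filter (fun p => !decide (p.1 ≤ cp))).filter
          (fun p => decide (p.1 ≤ c))) = pvMv arr c := by
        rw [← hMv cp, far_step S hcpc, hMv c]
      have hrem := rem_step S hcpc
      show (if c < (arr.length : Int) then _ else _) = (if c < (arr.length : Int) then _ else _)
      rw [if_pos hcn, if_pos hcn]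
      simp only [hcons, hfar, hrem, best_at arr c hc0 hcn]
      by_cases hstop : pvMv arr c = c
      · rw [if_pos hstop, if_pos hstop]
      · rw [if_neg hstop, if_neg hstop]
        exact ih c (pvMv arr c + 1) (count + 1)
          (by have := pvMv_mono arr hcpc; omega)
          (by have := pvMv_nonneg arr c; omega)
          (by omega)
    · show (if c < (arr.length : Int) then _ else _) = (if c < (arr.length : Int) then _ else _)
      rw [if_neg hcn, if_neg hcn]
-- ===== VERDICT (by name: the statement is the Claim_ definition above) =====
theorem min_people_spec : Claim_equal_min_people := by
  unfold Claim_equal_min_people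
  intro arr _
  unfold Spec_min_people
  have hnil : (pvIvs arr).filter (fun p => decide (p.1 ≤ (-1 : Int))) = [] := by
    rw [List.filter_eq_nil_iff]
    intro q hq
    have := mem_pvIvs_fst_nonneg arr hq
    simp
    omega
  have hMv0 : pvMv arr (-1) = 0 := by
    unfold pvMv
    rw [hnil]
    rfl
  have hall : (PySem.List.sorted2 (pvIvs arr) (fun q => q.1) (fun q => q.2)).filter
      (fun p => !decide (p.1 ≤ (-1 : Int)))
      = PySem.List.sorted2 (pvIvs arr) (fun q => q.1) (fun q => q.2) := by
    rw [List.filter_eq_self]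
    intro q hq
    have hq' : q ∈ pvIvs arr := (PySem.List.sorted2_perm _ _ _ _).mem_iff.mp hq
    have := mem_pvIvs_fst_nonneg arr hq'
    simp
    omega
  have h := loop_eq arr (arr.length + 1) (-1) 0 0 (by omega) (by omega) (by rw [hMv0]; omega)
  rw [hall, hMv0] at h
  simp only [min_people, min_people_alt]
  rw [build_eq]
  exact h
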